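-- pv_equiv track=rewrite | github.com/LazyEntity/leetcode | mycrosoft/Dice.py | solution
-- ===== SOURCE A (Python) =====
-- import math
--
-- def solution(a, b):
--     def fill(up, arr):
--         for dice in arr:
--             if up:
--                 dices[6 - dice] += 1
--             else:
--                 dices[dice - 1] += 1
--
--     distance = sum(a) - sum(b)
--     dices = [0] * 6
--     fill(distance < 0, a)
--     fill(distance > 0, b)
--
--     result, dice_div, distance = 0, 5, abs(distance)
--     while distance > 0 and dice_div > 0:
--         if dices[dice_div] != 0:
--             divisions = math.ceil(distance / dice_div)
--             min_div = min(dices[dice_div], divisions)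
--             result += min_div
--             distance -= min_div * dice_div
--         dice_div -= 1
--     return result if distance <= 0 else -1
-- ===== SOURCE B (Python) =====
-- def solution(a, b):
--     if any(d < 1 or d > 6 for d in a + b):
--         raise ValueError("die values must be in 1..6")
--     distance = sum(a) - sum(b)
--     if distance < 0:
--         distance, a, b = -distance, b, a
--     gains = sorted((g for g in [d - 1 for d in a] + [6 - d for d in b] if g > 0),
--                    reverse=True)
--     count = 0
--     for g in gains:
--         if distance <= 0:
--             break
--         distance -= g
--         count += 1
--     return count if distance <= 0 else -1
-- ===== Notes on version B (the rewrite author's own statement) =====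
-- stated objective: alternative
-- what changed: Replaces A's six-bucket counting table and batched ceil-division greedy loop with a flat list of positive per-die gains sorted in descending order and consumed one element at a time; B validates that every die value is 1..6 and raises ValueError otherwise.
-- outside the precondition, e.g. on solution([7], [1, 1, 1, 1, 1, 1, 1, 1]): A returns 1, B raises ValueError; on solution([7], [4, 4]): A returns 1, B raises ValueError
import Mathlib
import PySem

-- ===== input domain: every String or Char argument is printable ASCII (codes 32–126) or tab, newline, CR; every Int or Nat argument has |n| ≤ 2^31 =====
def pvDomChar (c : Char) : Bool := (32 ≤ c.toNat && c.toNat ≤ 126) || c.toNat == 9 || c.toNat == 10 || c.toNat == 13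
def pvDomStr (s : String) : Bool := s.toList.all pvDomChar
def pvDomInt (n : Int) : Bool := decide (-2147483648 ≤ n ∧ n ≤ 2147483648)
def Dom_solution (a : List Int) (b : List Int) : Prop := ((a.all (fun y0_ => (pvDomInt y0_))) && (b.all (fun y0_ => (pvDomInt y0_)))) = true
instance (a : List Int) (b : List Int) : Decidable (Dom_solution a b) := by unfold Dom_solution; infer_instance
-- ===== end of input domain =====

-- B replaces A's six-bucket counting table and batched ceil-division greedy with a flat
-- descending-sorted list of positive per-die gains consumed one element at a time
-- (alternative decomposition; same results on the dice domain stated in Pre_solution).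

-- ===== PORT A =====
-- math.ceil(distance / dice_div) on ints: integer ceiling division (exact here: the float
-- quotient Python rounds is of modest magnitude on the admitted inputs).
def cdivA (d g : Int) : Int := -(PySem.Int.floordiv (-d) g)

-- one iteration of the inner 'fill' closure: dices[6-dice] += 1 / dices[dice-1] += 1;
-- none = IndexError (excluded by Pre_solution)
def fillStep (up : Bool) (st : Option (List Int)) (dice : Int) : Option (List Int) :=
  st.bind (fun ds =>
    let idx : Int := if up then 6 - dice else dice - 1
    match PySem.List.pyGet? ds idx with
    | none => none
    | some v => PySem.List.pySet? ds idx (v + 1))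

def fillA (up : Bool) (arr : List Int) (dices : List Int) : Option (List Int) :=
  arr.foldl (fillStep up) (some dices)

-- the while loop: the fuel is the current value of dice_div (5,4,...,0); dices always has
-- length 6, so the read dices[dice_div] is in range and the .getD default is never used.
def loopA (dices : List Int) (distance result : Int) : Nat → Int
  | 0 => if distance ≤ 0 then result else -1
  | (n+1) =>
    if 0 < distance then
      let cnt := (PySem.List.pyGet? dices ((n : Int) + 1)).getD 0
      if cnt ≠ 0 then
        let minDiv := min cnt (cdivA distance ((n : Int) + 1))
        loopA dices (distance - minDiv * ((n : Int) + 1)) (result + minDiv) n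
      else loopA dices distance result n
    else result

def solution (a : List Int) (b : List Int) : Int :=
  let distance := a.sum - b.sum
  match fillA (decide (distance < 0)) a (List.replicate 6 0) with
  | none => -1   -- Python raises IndexError here (outside Pre_solution)
  | some ds1 =>
    match fillA (decide (0 < distance)) b ds1 with
    | none => -1 -- Python raises IndexError here (outside Pre_solution)
    | some ds => loopA ds |distance| 0 5

-- ===== PORT B =====
-- the for-loop over gains: break as soon as distance <= 0, else consume one gain
def greedyB : List Int → Int → Int → Int
  | [], distance, count => if distance ≤ 0 then count else -1
  | g :: gs, distance, count =>
    if distance ≤ 0 then count else greedyB gs (distance - g) (count + 1)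

def solution_alt (a : List Int) (b : List Int) : Int :=
  -- 'raise ValueError' for a die value outside 1..6 (outside Pre_solution): the port
  -- returns -1 there, a value never compared (the tester samples inside Pre_solution)
  if (a ++ b).any (fun d => decide (d < 1) || decide (6 < d)) then -1
  else
  let distance := a.sum - b.sum
  let p : Int × List Int × List Int :=
    if distance < 0 then (-distance, b, a) else (distance, a, b)
  let gains := PySem.List.sorted
    (((p.2.1.map (fun d => d - 1)) ++ (p.2.2.map (fun d => 6 - d))).filter
      (fun g => decide (0 < g)))
    (fun x => x) true
  greedyB gains p.1 0

-- ===== PRECONDITION & SPEC =====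
-- Pre_ is the natural dice domain: every element of a and b is a die value 1..6. Outside it
-- A either raises IndexError or, via negative-index wraparound into 'dices', silently counts
-- a die value d as if it were d - 6, while B rejects such input with ValueError.
def Pre_solution (a : List Int) (b : List Int) : Prop :=
  (∀ x ∈ a, 1 ≤ x ∧ x ≤ 6) ∧ (∀ x ∈ b, 1 ≤ x ∧ x ≤ 6)
instance (a : List Int) (b : List Int) : Decidable (Pre_solution a b) := by
  unfold Pre_solution; infer_instance

def pvWitness_solution : List Int × List Int := ([1, 2, 6], [4, 5])

def Spec_solution (a : List Int) (b : List Int) (out : Int) : Prop := out = solution_alt a b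
instance (a : List Int) (b : List Int) (out : Int) : Decidable (Spec_solution a b out) := by
  unfold Spec_solution; infer_instance

-- ===== CLAIM (what is proved, stated in full; the proofs are below) =====
def Claim_equal_solution : Prop := ∀ (a : List Int) (b : List Int), Dom_solution a b → Pre_solution a b → Spec_solution a b (solution a b)

-- ===== LEMMAS AND PROOFS =====

theorem cdivA_brackets (d g : Int) (hg : 0 < g) :
    (cdivA d g - 1) * g < d ∧ d ≤ cdivA d g * g :=
  (PySem.Int.neg_floordiv_neg_eq_iff_of_pos (a := d) (b := g) (q := cdivA d g) hg).mp rfl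
theorem cdivA_pos (d g : Int) (hg : 0 < g) (hd : 0 < d) : 1 ≤ cdivA d g := by
  obtain ⟨-, h2⟩ := cdivA_brackets d g hg; nlinarith
theorem cdivA_succ (d g : Int) (hg : 0 < g) :
    cdivA d g = cdivA (d - g) g + 1 := by
  obtain ⟨h1, h2⟩ := cdivA_brackets d g hg
  have : cdivA (d - g) g = cdivA d g - 1 := by
    unfold cdivA at h1 h2 ⊢
    rw [PySem.Int.neg_floordiv_neg_eq_iff_of_pos hg]
    constructor <;> nlinarith
  omega
theorem cdivA_eq_one (d g : Int) (hg : 0 < g) (hd1 : 0 < d) (hd2 : d ≤ g) :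
    cdivA d g = 1 := by
  unfold cdivA
  rw [PySem.Int.neg_floordiv_neg_eq_iff_of_pos hg]
  constructor <;> nlinarith
theorem greedyB_of_nonpos (l : List Int) (d c : Int) (hd : d ≤ 0) : greedyB l d c = c := by
  cases l <;> simp [greedyB, hd]
theorem loopA_of_nonpos (ds : List Int) (d c : Int) (n : Nat) (hd : d ≤ 0) :
    loopA ds d c n = c := by
  cases n <;> simp [loopA, hd]

theorem greedyB_replicate (g : Int) (hg : 0 < g) :
    ∀ (k : Nat) (rest : List Int) (d c : Int), 0 < d →
      greedyB (List.replicate k g ++ rest) d c =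
        greedyB rest (d - min (k : Int) (cdivA d g) * g) (c + min (k : Int) (cdivA d g)) := by
  intro k
  induction k with
  | zero =>
    intro rest d c hd
    have h1 := cdivA_pos d g hg hd
    push_cast
    rw [min_eq_left (by omega : (0:Int) ≤ cdivA d g)]
    norm_num
  | succ k ih =>
    intro rest d c hd
    have hdle : ¬ d ≤ 0 := by omega
    rw [List.replicate_succ, List.cons_append]
    simp only [greedyB, if_neg hdle]
    by_cases h2 : 0 < d - g
    · rw [ih rest (d - g) (c + 1) h2]
      have hs := cdivA_succ d g hg
      have e1 : d - min ((k:Nat)+1 : Int) (cdivA d g) * g = d - g - min (k : Int) (cdivA (d-g) g) * g := by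
        rw [hs]; have : min ((k:Nat)+1 : Int) (cdivA (d-g) g + 1) = min (k:Int) (cdivA (d-g) g) + 1 := by omega
        rw [this]; ring
      have e2 : c + min ((k:Nat)+1 : Int) (cdivA d g) = c + 1 + min (k : Int) (cdivA (d-g) g) := by
        rw [hs]; omega
      push_cast at e1 e2 ⊢
      rw [e1, e2]
    · have hle : d - g ≤ 0 := by omega
      rw [greedyB_of_nonpos _ _ _ hle]
      rw [cdivA_eq_one d g hg hd (by omega)]
      have : min ((k:Nat)+1 : Int) 1 = 1 := by omega
      push_cast at this ⊢
      rw [this, greedyB_of_nonpos _ _ _ (by omega : d - 1 * g ≤ 0)]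

theorem loopA_step (ds : List Int) (d c : Int) (n : Nat) (hd : 0 < d) (k : Nat)
    (hk : (PySem.List.pyGet? ds ((n : Int) + 1)).getD 0 = (k : Int)) :
    loopA ds d c (n+1) =
      loopA ds (d - min (k:Int) (cdivA d ((n:Int)+1)) * ((n:Int)+1))
        (c + min (k:Int) (cdivA d ((n:Int)+1))) n := by
  simp only [loopA, if_pos hd, hk]
  by_cases hk0 : (k:Int) ≠ 0
  · rw [if_pos hk0]
  · have hz : (k:Int) = 0 := by omega
    have h1 := cdivA_pos d ((n:Int)+1) (by omega) hd
    rw [hz, min_eq_left (by omega : (0:Int) ≤ cdivA d ((n:Int)+1))]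
    norm_num

theorem loopA_level (ds rest : List Int) (n k : Nat)
    (hk : (PySem.List.pyGet? ds ((n : Int) + 1)).getD 0 = (k : Int))
    (ih : ∀ d c : Int, loopA ds d c n = greedyB rest d c) :
    ∀ d c : Int, loopA ds d c (n+1) = greedyB (List.replicate k ((n:Int)+1) ++ rest) d c := by
  intro d c
  by_cases hd : 0 < d
  · rw [loopA_step ds d c n hd k hk,
        greedyB_replicate ((n:Int)+1) (by omega) k rest d c hd, ih]
  · rw [loopA_of_nonpos _ _ _ _ (by omega), greedyB_of_nonpos _ _ _ (by omega)]

theorem loopA_bridge (y0 : Int) (n1 n2 n3 n4 n5 : Nat) (d c : Int) :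
    loopA [y0, (n1:Int), (n2:Int), (n3:Int), (n4:Int), (n5:Int)] d c 5 =
      greedyB (List.replicate n5 5 ++ (List.replicate n4 4 ++ (List.replicate n3 3 ++
        (List.replicate n2 2 ++ List.replicate n1 1)))) d c := by
  have base : ∀ d c : Int, loopA [y0, (n1:Int), (n2:Int), (n3:Int), (n4:Int), (n5:Int)] d c 0 = greedyB [] d c :=
    fun d c => rfl
  have l1 := loopA_level _ _ 0 n1 (by norm_num [PySem.List.pyGet?, PySem.List.pyIdx?, Int.toNat, List.getElem_cons_succ]) base
  have l2 := loopA_level _ _ 1 n2 (by norm_num [PySem.List.pyGet?, PySem.List.pyIdx?, Int.toNat, List.getElem_cons_succ]) l1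
  have l3 := loopA_level _ _ 2 n3 (by norm_num [PySem.List.pyGet?, PySem.List.pyIdx?, Int.toNat, List.getElem_cons_succ]) l2
  have l4 := loopA_level _ _ 3 n4 (by norm_num [PySem.List.pyGet?, PySem.List.pyIdx?, Int.toNat, List.getElem_cons_succ]) l3
  have l5 := loopA_level _ _ 4 n5 (by norm_num [PySem.List.pyGet?, PySem.List.pyIdx?, Int.toNat, List.getElem_cons_succ]) l4
  have := l5 d c
  norm_num at this
  exact this

theorem fillA_eq (up : Bool) : ∀ (arr : List Int), (∀ x ∈ arr, 1 ≤ x ∧ x ≤ 6) →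
    ∀ x0 x1 x2 x3 x4 x5 : Int,
    fillA up arr [x0,x1,x2,x3,x4,x5] =
      some [x0 + ((arr.map (fun d => if up then 6 - d else d - 1)).count 0 : Int),
            x1 + ((arr.map (fun d => if up then 6 - d else d - 1)).count 1 : Int),
            x2 + ((arr.map (fun d => if up then 6 - d else d - 1)).count 2 : Int),
            x3 + ((arr.map (fun d => if up then 6 - d else d - 1)).count 3 : Int),
            x4 + ((arr.map (fun d => if up then 6 - d else d - 1)).count 4 : Int),
            x5 + ((arr.map (fun d => if up then 6 - d else d - 1)).count 5 : Int)] := by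
  intro arr
  induction arr with
  | nil => intro _ x0 x1 x2 x3 x4 x5; simp [fillA]
  | cons h t ih =>
    intro hb x0 x1 x2 x3 x4 x5
    have hh : 1 ≤ h ∧ h ≤ 6 := hb h List.mem_cons_self
    have hbt : ∀ x ∈ t, 1 ≤ x ∧ x ≤ 6 := fun x hx => hb x (List.mem_cons_of_mem _ hx)
    have hg0 : 0 ≤ (if up then 6 - h else h - 1) := by split <;> omega
    have hg5 : (if up then 6 - h else h - 1) ≤ 5 := by split <;> omega
    obtain ⟨g, hg⟩ : ∃ g, (if up then 6 - h else h - 1) = g := ⟨_, rfl⟩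
    rw [hg] at hg0 hg5
    have ih' := ih hbt
    unfold fillA at ih' ⊢
    rw [List.foldl_cons]
    interval_cases g
    · have hstep : fillStep up (some [x0, x1, x2, x3, x4, x5]) h = some [x0 + 1, x1, x2, x3, x4, x5] := by
        simp [fillStep, hg, PySem.List.pyGet?, PySem.List.pyIdx?, PySem.List.pySet?,
          Int.toNat, List.set]
      rw [hstep, ih']
      simp only [List.map_cons, hg, List.count_cons, Option.some.injEq, List.cons.injEq]
      and_intros <;> (push_cast; try simp; try ring)
    · have hstep : fillStep up (some [x0, x1, x2, x3, x4, x5]) h = some [x0, x1 + 1, x2, x3, x4, x5] := by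
        simp [fillStep, hg, PySem.List.pyGet?, PySem.List.pyIdx?, PySem.List.pySet?,
          Int.toNat, List.set]
      rw [hstep, ih']
      simp only [List.map_cons, hg, List.count_cons, Option.some.injEq, List.cons.injEq]
      and_intros <;> (push_cast; try simp; try ring)
    · have hstep : fillStep up (some [x0, x1, x2, x3, x4, x5]) h = some [x0, x1, x2 + 1, x3, x4, x5] := by
        simp [fillStep, hg, PySem.List.pyGet?, PySem.List.pyIdx?, PySem.List.pySet?,
          Int.toNat, List.set]
      rw [hstep, ih']
      simp only [List.map_cons, hg, List.count_cons, Option.some.injEq, List.cons.injEq]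
      and_intros <;> (push_cast; try simp; try ring)
    · have hstep : fillStep up (some [x0, x1, x2, x3, x4, x5]) h = some [x0, x1, x2, x3 + 1, x4, x5] := by
        simp [fillStep, hg, PySem.List.pyGet?, PySem.List.pyIdx?, PySem.List.pySet?,
          Int.toNat, List.set]
      rw [hstep, ih']
      simp only [List.map_cons, hg, List.count_cons, Option.some.injEq, List.cons.injEq]
      and_intros <;> (push_cast; try simp; try ring)
    · have hstep : fillStep up (some [x0, x1, x2, x3, x4, x5]) h = some [x0, x1, x2, x3, x4 + 1, x5] := by
        simp [fillStep, hg, PySem.List.pyGet?, PySem.List.pyIdx?, PySem.List.pySet?,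
          Int.toNat, List.set]
      rw [hstep, ih']
      simp only [List.map_cons, hg, List.count_cons, Option.some.injEq, List.cons.injEq]
      and_intros <;> (push_cast; try simp; try ring)
    · have hstep : fillStep up (some [x0, x1, x2, x3, x4, x5]) h = some [x0, x1, x2, x3, x4, x5 + 1] := by
        simp [fillStep, hg, PySem.List.pyGet?, PySem.List.pyIdx?, PySem.List.pySet?,
          Int.toNat, List.set]
      rw [hstep, ih']
      simp only [List.map_cons, hg, List.count_cons, Option.some.injEq, List.cons.injEq]
      and_intros <;> (push_cast; try simp; try ring)

theorem split_top (m : Int) : ∀ (l : List Int), l.Pairwise (fun a b => b ≤ a) →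
    (∀ x ∈ l, 1 ≤ x ∧ x ≤ m) →
    l = List.replicate (l.count m) m ++ l.filter (fun x => decide (x < m)) ∧
    (l.filter (fun x => decide (x < m))).Pairwise (fun a b => b ≤ a) ∧
    (∀ x ∈ l.filter (fun x => decide (x < m)), 1 ≤ x ∧ x ≤ m - 1) := by
  intro l
  induction l with
  | nil => intro _ _; simp
  | cons a t ih =>
    intro hp hb
    rw [List.pairwise_cons] at hp
    obtain ⟨ha, hpt⟩ := hp
    have hab := hb a List.mem_cons_self
    by_cases ham : a = m
    · subst ham
      obtain ⟨e, p, bnd⟩ := ih hpt (fun x hx => hb x (List.mem_cons_of_mem _ hx))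
      refine ⟨?_, ?_, ?_⟩
      · rw [List.count_cons_self, List.replicate_succ, List.cons_append,
          List.filter_cons_of_neg (by simp)]
        exact congrArg _ e
      · rw [List.filter_cons_of_neg (by simp)]; exact p
      · rw [List.filter_cons_of_neg (by simp)]; exact bnd
    · have ham' : a < m := lt_of_le_of_ne hab.2 ham
      have hle : ∀ x ∈ a :: t, x < m := by
        intro x hx
        rcases List.mem_cons.mp hx with h | h
        · omega
        · have := ha x h; omega
      have hc : (a :: t).count m = 0 :=
        List.count_eq_zero.mpr (fun hm => by have := hle m hm; omega)
      have hf : (a :: t).filter (fun x => decide (x < m)) = a :: t :=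
        List.filter_eq_self.mpr (fun x hx => decide_eq_true (hle x hx))
      refine ⟨by rw [hc, hf]; simp, by rw [hf]; exact List.pairwise_cons.mpr ⟨ha, hpt⟩, ?_⟩
      intro x hx
      rw [hf] at hx
      have := hb x hx
      have := hle x hx
      omega

theorem canon (l : List Int) (hs : l.Pairwise (fun a b => b ≤ a))
    (hb : ∀ x ∈ l, 1 ≤ x ∧ x ≤ 5) :
    l = List.replicate (l.count 5) 5 ++ (List.replicate (l.count 4) 4 ++
        (List.replicate (l.count 3) 3 ++ (List.replicate (l.count 2) 2 ++
        List.replicate (l.count 1) 1))) := by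
  obtain ⟨e5, p5, b5⟩ := split_top 5 l hs hb
  obtain ⟨e4, p4, b4⟩ := split_top 4 _ p5 (by simpa using b5)
  obtain ⟨e3, p3, b3⟩ := split_top 3 _ p4 (by simpa using b4)
  obtain ⟨e2, p2, b2⟩ := split_top 2 _ p3 (by simpa using b3)
  obtain ⟨e1, p1, b1⟩ := split_top 1 _ p2 (by simpa using b2)
  have hnil : ((((l.filter (fun x => decide (x < 5))).filter (fun x => decide (x < 4))).filter
      (fun x => decide (x < 3))).filter (fun x => decide (x < 2))).filter (fun x => decide (x < 1)) = [] := by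
    rw [List.eq_nil_iff_forall_not_mem]
    intro x hx
    have := b1 x hx
    omega
  have c4 : (l.filter (fun x => decide (x < 5))).count 4 = l.count 4 :=
    List.count_filter (by norm_num)
  have c3 : ((l.filter (fun x => decide (x < 5))).filter (fun x => decide (x < 4))).count 3 = l.count 3 := by
    rw [List.count_filter (by norm_num), List.count_filter (by norm_num)]
  have c2 : (((l.filter (fun x => decide (x < 5))).filter (fun x => decide (x < 4))).filter
      (fun x => decide (x < 3))).count 2 = l.count 2 := by
    rw [List.count_filter (by norm_num), List.count_filter (by norm_num), List.count_filter (by norm_num)]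
  have c1 : ((((l.filter (fun x => decide (x < 5))).filter (fun x => decide (x < 4))).filter
      (fun x => decide (x < 3))).filter (fun x => decide (x < 2))).count 1 = l.count 1 := by
    rw [List.count_filter (by norm_num), List.count_filter (by norm_num),
      List.count_filter (by norm_num), List.count_filter (by norm_num)]
  conv_lhs => rw [e5, e4, e3, e2, e1, hnil, List.append_nil]
  rw [c4, c3, c2, c1]

theorem case_lemma (u v : List Int) (hu : ∀ x ∈ u, 1 ≤ x ∧ x ≤ 6)
    (hv : ∀ x ∈ v, 1 ≤ x ∧ x ≤ 6) (d : Int) :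
    loopA [((((u.map (fun x => x - 1)) ++ (v.map (fun x => 6 - x))).count 0 : Nat) : Int),
           ((((u.map (fun x => x - 1)) ++ (v.map (fun x => 6 - x))).count 1 : Nat) : Int),
           ((((u.map (fun x => x - 1)) ++ (v.map (fun x => 6 - x))).count 2 : Nat) : Int),
           ((((u.map (fun x => x - 1)) ++ (v.map (fun x => 6 - x))).count 3 : Nat) : Int),
           ((((u.map (fun x => x - 1)) ++ (v.map (fun x => 6 - x))).count 4 : Nat) : Int),
           ((((u.map (fun x => x - 1)) ++ (v.map (fun x => 6 - x))).count 5 : Nat) : Int)] d 0 5 =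
    greedyB (PySem.List.sorted
      (((u.map (fun x => x - 1)) ++ (v.map (fun x => 6 - x))).filter (fun g => decide (0 < g)))
      (fun x => x) true) d 0 := by
  set gl := (u.map (fun x => x - 1)) ++ (v.map (fun x => 6 - x)) with hgl
  set L := PySem.List.sorted (gl.filter (fun g => decide (0 < g))) (fun x => x) true with hL
  have hs : L.Pairwise (fun a b => b ≤ a) := PySem.List.sorted_pairwise_rev _ _
  have hperm : L.Perm (gl.filter (fun g => decide (0 < g))) := PySem.List.sorted_perm _ _ _
  have hbnd : ∀ x ∈ L, 1 ≤ x ∧ x ≤ 5 := by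
    intro x hx
    have hx' : x ∈ gl.filter (fun g => decide (0 < g)) := hperm.mem_iff.mp hx
    have h1 := List.of_mem_filter hx'
    have h2 := List.mem_of_mem_filter hx'
    have h1' : 0 < x := of_decide_eq_true h1
    rw [hgl] at h2
    rcases List.mem_append.mp h2 with h | h
    · obtain ⟨e, he, rfl⟩ := List.mem_map.mp h
      have := hu e he; omega
    · obtain ⟨e, he, rfl⟩ := List.mem_map.mp h
      have := hv e he; omega
  have hcount : ∀ j : Int, 0 < j → L.count j = gl.count j := by
    intro j hj
    rw [hperm.count_eq, List.count_filter (by simpa using hj)]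
  have hcanon := canon L hs hbnd
  rw [hcount 5 (by norm_num), hcount 4 (by norm_num), hcount 3 (by norm_num),
    hcount 2 (by norm_num), hcount 1 (by norm_num)] at hcanon
  rw [hcanon]
  exact loopA_bridge _ _ _ _ _ _ d 0

-- ===== VERDICT (by name: the statement is the Claim_ definition above) =====
theorem solution_spec : Claim_equal_solution := by
  intro a b _ hpre
  obtain ⟨ha, hb⟩ := hpre
  unfold Spec_solution
  have hguard : ((a ++ b).any (fun d => decide (d < 1) || decide (6 < d))) = false := by
    rw [List.any_eq_false]
    intro d hd
    rcases List.mem_append.mp hd with h | h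
    · have := ha d h; simp; omega
    · have := hb d h; simp; omega
  rcases lt_trichotomy (a.sum - b.sum) 0 with hd | hd | hd
  · have e1 : decide (a.sum - b.sum < 0) = true := decide_eq_true hd
    have e2 : decide (0 < a.sum - b.sum) = false := decide_eq_false (by omega)
    simp only [solution, solution_alt, e1, e2, hguard, Bool.false_eq_true, if_false, if_pos hd]
    rw [show List.replicate 6 (0:Int) = [0,0,0,0,0,0] from rfl,
      fillA_eq true a ha 0 0 0 0 0 0]
    simp only [zero_add]
    rw [fillA_eq false b hb]
    simp only [if_true, Bool.false_eq_true, if_false]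
    have hent : ∀ j : Int,
        ((List.count j (List.map (fun d => 6 - d) a) : Nat) : Int) +
          ((List.count j (List.map (fun d => d - 1) b) : Nat) : Int) =
        ((List.count j (List.map (fun d => d - 1) b ++ List.map (fun d => 6 - d) a) : Nat) : Int) := by
      intro j; rw [List.count_append]; push_cast; ring
    rw [hent 0, hent 1, hent 2, hent 3, hent 4, hent 5, abs_of_neg hd]
    exact case_lemma b a hb ha _
  · have e1 : decide (a.sum - b.sum < 0) = false := decide_eq_false (by omega)
    have e2 : decide (0 < a.sum - b.sum) = false := decide_eq_false (by omega)
    simp only [solution, solution_alt, e1, e2, hguard, Bool.false_eq_true, if_false,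
      if_neg (show ¬ a.sum - b.sum < 0 by omega)]
    rw [show List.replicate 6 (0:Int) = [0,0,0,0,0,0] from rfl,
      fillA_eq false a ha 0 0 0 0 0 0]
    simp only [zero_add]
    rw [fillA_eq false b hb]
    simp only [hd, abs_zero]
    exact (loopA_of_nonpos _ 0 0 5 le_rfl).trans (greedyB_of_nonpos _ 0 0 le_rfl).symm
  · have e1 : decide (a.sum - b.sum < 0) = false := decide_eq_false (by omega)
    have e2 : decide (0 < a.sum - b.sum) = true := decide_eq_true hd
    simp only [solution, solution_alt, e1, e2, hguard, Bool.false_eq_true, if_false,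
      if_neg (show ¬ a.sum - b.sum < 0 by omega)]
    rw [show List.replicate 6 (0:Int) = [0,0,0,0,0,0] from rfl,
      fillA_eq false a ha 0 0 0 0 0 0]
    simp only [zero_add]
    rw [fillA_eq true b hb]
    simp only [if_true, Bool.false_eq_true, if_false]
    have hent : ∀ j : Int,
        ((List.count j (List.map (fun d => d - 1) a) : Nat) : Int) +
          ((List.count j (List.map (fun d => 6 - d) b) : Nat) : Int) =
        ((List.count j (List.map (fun d => d - 1) a ++ List.map (fun d => 6 - d) b) : Nat) : Int) := by
      intro j; rw [List.count_append]; push_cast; ring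
    rw [hent 0, hent 1, hent 2, hent 3, hent 4, hent 5, abs_of_pos hd]
    exact case_lemma a b ha hb _
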